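-- pv_equiv track=rewrite | github.com/Nyanyan/Solvour | 4x4x4solver_v5/cube_class.py | ep_switch_parity_p
-- ===== SOURCE A (Python) =====
-- def ep_switch_parity_p(arr, res, strt):
--     for i in range(strt, 24):
--         if arr[i] != i:
--             for j in range(i + 1, 24):
--                 if arr[j] == i:
--                     arr[i], arr[j] = arr[j], arr[i]
--                     return ep_switch_parity_p(arr, res + 1, i + 1)
--     return res
-- ===== SOURCE B (Python) =====
-- def ep_switch_parity_p(arr, res, strt):
--     rest = [arr[j] for j in range(strt, 24)]
--     t = strt
--     swaps = 0
--     while rest: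
--         v = rest.pop(0)
--         if v != t and t in rest:
--             rest[rest.index(t)] = v
--             swaps += 1
--         t += 1
--     return res + swaps
-- ===== Notes on version B (the rewrite author's own statement) =====
-- stated objective: simpler
-- what changed: B replaces A's recursion-with-restart and nested index loops over the mutated 24-slot array by one pure pass that pops the front of the extracted window arr[strt:24] and overwrites the first later occurrence of the target value (B does not mutate arr; equivalence is about the return value); Pre_ excludes inputs where A raises IndexError (len(arr)<24 with strt<24, or strt<-len(arr)) and the band -len(arr)<=strt<24-len(arr), where A returns but its negative indices alias cells that positive indices also visit, a wraparound artefact.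
import Mathlib
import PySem

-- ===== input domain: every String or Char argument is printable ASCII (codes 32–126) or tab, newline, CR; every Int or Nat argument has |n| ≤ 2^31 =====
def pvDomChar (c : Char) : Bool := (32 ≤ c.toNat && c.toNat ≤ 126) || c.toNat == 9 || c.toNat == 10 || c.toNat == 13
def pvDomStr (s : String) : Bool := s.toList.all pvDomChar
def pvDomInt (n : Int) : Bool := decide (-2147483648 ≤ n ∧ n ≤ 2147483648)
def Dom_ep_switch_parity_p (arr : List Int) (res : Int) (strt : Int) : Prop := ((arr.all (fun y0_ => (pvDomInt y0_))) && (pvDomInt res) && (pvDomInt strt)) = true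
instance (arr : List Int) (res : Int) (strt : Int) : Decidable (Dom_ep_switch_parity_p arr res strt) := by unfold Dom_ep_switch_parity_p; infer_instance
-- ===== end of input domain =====

-- B replaces A's recursion-with-restart and nested index loops over the mutated array by one
-- pure pass over the extracted window arr[strt:24] (simpler, same cost); A mutates arr in place,
-- B does not — the equivalence proved here is about the return value only.

-- ===== PORT A =====
-- inner loop 'for j in range(i + 1, 24): if arr[j] == i: …' — first such j;
-- an out-of-range arr[j] is an IndexError in Python (excluded by Pre_): the port returns none there
def epFindA (arr : List Int) (t : Int) (j : Int) : Option Int :=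
  if _h : j < 24 then
    match PySem.List.pyGet? arr j with
    | some w => if w = t then some j else epFindA arr t (j + 1)
    | none => none
  else none
termination_by (24 - j).toNat
decreasing_by omega

-- outer loop 'for i in range(strt, 24)'; the recursive call ep_switch_parity_p(arr, res+1, i+1)
-- after the swap arr[i], arr[j] = arr[j], arr[i] is the epOuterA call on the doubly-set list
def epOuterA (arr : List Int) (res : Int) (i : Int) : Int :=
  if _h : i < 24 then
    match PySem.List.pyGet? arr i with
    | none => 0   -- IndexError in Python; excluded by Pre_
    | some v =>
      if v ≠ i then
        match epFindA arr i (i + 1) with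
        | some j =>
            epOuterA (PySem.List.pySetD (PySem.List.pySetD arr i (PySem.List.pyGetD arr j 0)) j v)
              (res + 1) (i + 1)
        | none => epOuterA arr res (i + 1)
      else epOuterA arr res (i + 1)
  else res
termination_by (24 - i).toNat
decreasing_by all_goals omega

def ep_switch_parity_p (arr : List Int) (res : Int) (strt : Int) : Int :=
  epOuterA arr res strt

-- ===== PORT B =====
-- 'while rest: v = rest.pop(0); if v != t and t in rest: rest[rest.index(t)] = v; swaps += 1; t += 1'
def epLoopB (rest : List Int) (t : Int) (swaps : Int) : Int :=
  match rest with
  | [] => swaps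
  | v :: rs =>
    if v ≠ t ∧ t ∈ rs then
      epLoopB (rs.set ((PySem.List.index? rs t).getD 0) v) (t + 1) (swaps + 1)
    else epLoopB rs (t + 1) swaps
termination_by rest.length
decreasing_by all_goals simp [List.length_set]

def ep_switch_parity_p_alt (arr : List Int) (res : Int) (strt : Int) : Int :=
  res + epLoopB ((PySem.List.pyRange strt 24 1).map (fun j => PySem.List.pyGetD arr j 0)) strt 0

-- ===== PRECONDITION & SPEC =====
-- Pre_ excludes inputs where A raises IndexError (len(arr) < 24 with strt < 24, or strt < -len(arr)),
-- and the band -len(arr) ≤ strt < 24 - len(arr), where A returns but Python's negative indices alias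
-- the same cells that positive indices also visit — A's double visit of those cells is a wraparound artefact.
def Pre_ep_switch_parity_p (arr : List Int) (res : Int) (strt : Int) : Prop :=
  24 ≤ strt ∨ (24 ≤ (arr.length : Int) ∧ 24 - (arr.length : Int) ≤ strt)
instance (arr : List Int) (res : Int) (strt : Int) : Decidable (Pre_ep_switch_parity_p arr res strt) := by unfold Pre_ep_switch_parity_p; infer_instance

def pvWitness_ep_switch_parity_p : List Int × Int × Int :=
  ([1, 0, 2, 3, 4, 5, 6, 7, 8, 9, 10, 11, 12, 13, 14, 15, 16, 17, 18, 19, 20, 21, 22, 23], 0, 0)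

def Spec_ep_switch_parity_p (arr : List Int) (res : Int) (strt : Int) (out : Int) : Prop := out = ep_switch_parity_p_alt arr res strt
instance (arr : List Int) (res : Int) (strt : Int) (out : Int) : Decidable (Spec_ep_switch_parity_p arr res strt out) := by unfold Spec_ep_switch_parity_p; infer_instance

-- ===== CLAIM (what is proved, stated in full; the proofs are below) =====
def Claim_equal_ep_switch_parity_p : Prop := ∀ (arr : List Int) (res : Int) (strt : Int), Dom_ep_switch_parity_p arr res strt → Pre_ep_switch_parity_p arr res strt → Spec_ep_switch_parity_p arr res strt (ep_switch_parity_p arr res strt)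

-- ===== LEMMAS AND PROOFS =====

-- the window arr[strt:24] B extracts, as a function of the lower bound
def win (arr : List Int) (i : Int) : List Int :=
  (PySem.List.pyRange i 24 1).map (fun j => PySem.List.pyGetD arr j 0)

-- physical cell behind logical index j
def cellIdx (n : Nat) (j : Int) : Nat := if 0 ≤ j then j.toNat else n - (-j).toNat

theorem pyIdx_eq_cell (n : Nat) (j : Int) (hl : 24 ≤ (n : Int))
    (hlo : 24 - (n : Int) ≤ j) (hhi : j < 24) :
    PySem.List.pyIdx? n j = some (cellIdx n j) := by
  simp only [PySem.List.pyIdx?, cellIdx]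
  split_ifs <;> first | rfl | omega

theorem cellIdx_lt (n : Nat) (j : Int) (hl : 24 ≤ (n : Int))
    (hlo : 24 - (n : Int) ≤ j) (hhi : j < 24) : cellIdx n j < n := by
  simp only [cellIdx]; split_ifs <;> omega

theorem cellIdx_inj (n : Nat) (j1 j2 : Int) (hl : 24 ≤ (n : Int))
    (h1 : 24 - (n : Int) ≤ j1) (h1' : j1 < 24)
    (h2 : 24 - (n : Int) ≤ j2) (h2' : j2 < 24)
    (h : cellIdx n j1 = cellIdx n j2) : j1 = j2 := by
  simp only [cellIdx] at h; split_ifs at h <;> omega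

theorem pyGet?_cell (arr : List Int) (j : Int) (hl : 24 ≤ (arr.length : Int))
    (hlo : 24 - (arr.length : Int) ≤ j) (hhi : j < 24) :
    PySem.List.pyGet? arr j = arr[cellIdx arr.length j]? := by
  simp [PySem.List.pyGet?, pyIdx_eq_cell arr.length j hl hlo hhi]

theorem pyGet?_eq_some_getD (arr : List Int) (j : Int) (hl : 24 ≤ (arr.length : Int))
    (hlo : 24 - (arr.length : Int) ≤ j) (hhi : j < 24) :
    PySem.List.pyGet? arr j = some (PySem.List.pyGetD arr j 0) := by
  have hc := cellIdx_lt arr.length j hl hlo hhi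
  simp [PySem.List.pyGetD, pyGet?_cell arr j hl hlo hhi, List.getElem?_eq_getElem hc]

theorem pySetD_cell (arr : List Int) (j : Int) (x : Int) (hl : 24 ≤ (arr.length : Int))
    (hlo : 24 - (arr.length : Int) ≤ j) (hhi : j < 24) :
    PySem.List.pySetD arr j x = arr.set (cellIdx arr.length j) x := by
  simp [PySem.List.pySetD, PySem.List.pySet?, pyIdx_eq_cell arr.length j hl hlo hhi]

theorem getD_setD_noalias (arr : List Int) (j1 j2 x : Int)
    (hl : 24 ≤ (arr.length : Int))
    (h1 : 24 - (arr.length : Int) ≤ j1) (h1' : j1 < 24)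
    (h2 : 24 - (arr.length : Int) ≤ j2) (h2' : j2 < 24) :
    PySem.List.pyGetD (PySem.List.pySetD arr j1 x) j2 0 =
      if j2 = j1 then x else PySem.List.pyGetD arr j2 0 := by
  rw [pySetD_cell arr j1 x hl h1 h1']
  have hlen : (arr.set (cellIdx arr.length j1) x).length = arr.length := by
    simp [List.length_set]
  have hget := pyGet?_cell (arr.set (cellIdx arr.length j1) x) j2 (by rw [hlen]; exact hl)
    (by rw [hlen]; exact h2) h2'
  rw [hlen] at hget
  simp only [PySem.List.pyGetD, hget, pyGet?_cell arr j2 hl h2 h2']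
  rw [List.getElem?_set]
  by_cases he : j2 = j1
  · subst he; simp [cellIdx_lt arr.length j2 hl h2 h2']
  · have : cellIdx arr.length j1 ≠ cellIdx arr.length j2 := by
      intro hc; exact he (cellIdx_inj arr.length j2 j1 hl h2 h2' h1 h1' hc.symm)
    simp [this, he]

theorem win_nil (arr : List Int) (i : Int) (h : 24 ≤ i) : win arr i = [] := by
  simp [win, PySem.List.pyRange_one_eq_nil h]

theorem win_cons (arr : List Int) (i : Int) (h : i < 24) :
    win arr i = PySem.List.pyGetD arr i 0 :: win arr (i + 1) := by
  rw [win, PySem.List.pyRange_one_cons h]; rfl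

theorem win_length (arr : List Int) (i : Int) : (win arr i).length = (24 - i).toNat := by
  simp [win, PySem.List.length_pyRange_one]

theorem win_getElem (arr : List Int) (i : Int) (m : Nat) (hm : m < (win arr i).length) :
    (win arr i)[m] = PySem.List.pyGetD arr (i + (m : Int)) 0 := by
  simp [win, PySem.List.getElem_pyRange_one]

-- the swap arr[i] ↔ arr[j] rewrites B's window of i+1 at offset k = j - (i+1)
theorem win_set (arr : List Int) (i j v w : Int) (k : Nat)
    (hl : 24 ≤ (arr.length : Int)) (hlo : 24 - (arr.length : Int) ≤ i) (hi : i < 24)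
    (hj : j = i + 1 + (k : Int)) (hj24 : j < 24) :
    win (PySem.List.pySetD (PySem.List.pySetD arr i w) j v) (i + 1) =
      (win arr (i + 1)).set k v := by
  have hlen1 : (PySem.List.pySetD arr i w).length = arr.length := by
    rw [pySetD_cell arr i w hl hlo hi]; simp [List.length_set]
  apply List.ext_getElem
  · simp [win_length, List.length_set]
  · intro m hm1 hm2
    rw [win_getElem _ _ _ hm1, List.getElem_set]
    have hm24 : i + 1 + (m : Int) < 24 := by
      have := hm1; rw [win_length] at this; omega
    have hm' : 24 - (arr.length : Int) ≤ i + 1 + (m : Int) := by omega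
    rw [getD_setD_noalias (PySem.List.pySetD arr i w) j (i + 1 + (m : Int)) v
        (by rw [hlen1]; exact hl) (by rw [hlen1]; omega) hj24 (by rw [hlen1]; exact hm') hm24]
    rw [getD_setD_noalias arr i (i + 1 + (m : Int)) w hl hlo hi hm' hm24]
    have hne : ¬ (i + 1 + (m : Int) = i) := by omega
    by_cases hk : k = m
    · subst hk; simp [hj]
    · have : ¬ (i + 1 + (m : Int) = j) := by rw [hj]; intro hc; apply hk; omega
      rw [if_neg this, if_neg hne, if_neg hk]
      rw [win_getElem arr (i + 1) m (by rw [win_length]; omega)]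

-- A's inner scan is list.index on B's window of i+1, shifted back to an absolute index
theorem findA_eq (arr : List Int) (t : Int) (hl : 24 ≤ (arr.length : Int)) :
    ∀ (fu : Nat) (j : Int), (24 - j).toNat ≤ fu → 24 - (arr.length : Int) ≤ j →
      epFindA arr t j =
        Option.map (fun k : Nat => j + (k : Int)) (PySem.List.index? (win arr j) t) := by
  intro fu
  induction fu with
  | zero =>
    intro j hfu hlo
    have h24 : 24 ≤ j := by omega
    rw [epFindA, win_nil arr j h24]
    rw [dif_neg (show ¬ j < 24 by omega)]
    rw [(PySem.List.index?_eq_none_iff [] t).mpr (by simp)]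
    rfl
  | succ n ih =>
    intro j hfu hlo
    by_cases h : j < 24
    · rw [epFindA]
      simp only [dif_pos h, pyGet?_eq_some_getD arr j hl hlo h]
      rw [win_cons arr j h]
      by_cases he : PySem.List.pyGetD arr j 0 = t
      · rw [if_pos he, he, PySem.List.index?_cons_self]
        simp
      · rw [if_neg he, ih (j + 1) (by omega) (by omega)]
        rw [PySem.List.index?_cons_of_ne _ he]
        cases PySem.List.index? (win arr (j + 1)) t with
        | none => rfl
        | some k =>
          simp only [Option.map_some, Option.some.injEq]
          push_cast; ring
    · rw [epFindA, win_nil arr j (by omega)]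
      rw [dif_neg h, (PySem.List.index?_eq_none_iff [] t).mpr (by simp)]
      rfl

-- main invariant: A's recursion from (arr, res, i) is B's loop on the window of i
theorem outer_eq : ∀ (fu : Nat) (arr : List Int) (res i : Int),
    (24 - i).toNat ≤ fu → 24 ≤ (arr.length : Int) → 24 - (arr.length : Int) ≤ i →
    epOuterA arr res i = epLoopB (win arr i) i res := by
  intro fu
  induction fu with
  | zero =>
    intro arr res i hfu hl hlo
    have h24 : 24 ≤ i := by omega
    rw [epOuterA, win_nil arr i h24]
    rw [dif_neg (show ¬ i < 24 by omega), epLoopB]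
  | succ n ih =>
    intro arr res i hfu hl hlo
    by_cases h : i < 24
    · have hsome : PySem.List.pyGet? arr i = some (PySem.List.pyGetD arr i 0) :=
        pyGet?_eq_some_getD arr i hl hlo h
      rw [epOuterA]
      simp only [dif_pos h, hsome]
      rw [win_cons arr i h, epLoopB]
      by_cases he : PySem.List.pyGetD arr i 0 = i
      · rw [if_neg (not_not_intro he), if_neg (fun hc => hc.1 he)]
        exact ih arr res (i + 1) (by omega) hl (by omega)
      · rw [if_pos he]
        rw [findA_eq arr i hl (n + 1) (i + 1) (by omega) (by omega)]
        cases hidx : PySem.List.index? (win arr (i + 1)) i with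
        | none =>
          have hmem : i ∉ win arr (i + 1) := (PySem.List.index?_eq_none_iff _ _).mp hidx
          rw [if_neg (by intro hc; exact hmem hc.2)]
          simp only [Option.map_none]
          exact ih arr res (i + 1) (by omega) hl (by omega)
        | some k =>
          have hmem : i ∈ win arr (i + 1) := by
            have hs : (PySem.List.index? (win arr (i + 1)) i).isSome := by rw [hidx]; rfl
            exact (PySem.List.index?_isSome_iff _ _).mp hs
          rw [if_pos ⟨he, hmem⟩]
          simp only [Option.map_some, Option.getD_some]
          have hk : k < (win arr (i + 1)).length := by
            rcases PySem.List.getElem_of_index?_eq_some hidx with ⟨hk', _⟩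
            exact hk'
          have hj24 : i + 1 + (k : Int) < 24 := by
            rw [win_length] at hk; omega
          rw [ih (PySem.List.pySetD (PySem.List.pySetD arr i
                (PySem.List.pyGetD arr (i + 1 + (k : Int)) 0)) (i + 1 + (k : Int))
                (PySem.List.pyGetD arr i 0))
              (res + 1) (i + 1) (by omega)
              (by simp [PySem.List.length_pySetD, hl])
              (by simp [PySem.List.length_pySetD]; omega)]
          rw [win_set arr i (i + 1 + (k : Int)) (PySem.List.pyGetD arr i 0)
              (PySem.List.pyGetD arr (i + 1 + (k : Int)) 0) k hl hlo h rfl hj24]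
    · rw [epOuterA, win_nil arr i (by omega)]
      rw [dif_neg h, epLoopB]

theorem epLoopB_shift : ∀ (n : Nat) (rest : List Int), rest.length = n →
    ∀ (t s : Int), epLoopB rest t s = s + epLoopB rest t 0 := by
  intro n
  induction n with
  | zero =>
    intro rest hlen t s
    rw [List.length_eq_zero_iff] at hlen; subst hlen
    simp [epLoopB]
  | succ m ih =>
    intro rest hlen t s
    cases rest with
    | nil => simp at hlen
    | cons v rs =>
      simp at hlen
      rw [epLoopB, epLoopB]
      by_cases hc : v ≠ t ∧ t ∈ rs
      · rw [if_pos hc, if_pos hc]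
        rw [ih _ (by simp [List.length_set, hlen]) (t + 1) (s + 1),
            ih _ (by simp [List.length_set, hlen]) (t + 1) (0 + 1)]
        omega
      · rw [if_neg hc, if_neg hc, ih rs hlen (t + 1) s]

-- ===== VERDICT (by name: the statement is the Claim_ definition above) =====
theorem ep_switch_parity_p_spec : Claim_equal_ep_switch_parity_p := by
  intro arr res strt _ hpre
  unfold Spec_ep_switch_parity_p ep_switch_parity_p ep_switch_parity_p_alt
  rcases hpre with h24 | ⟨hl, hlo⟩
  · rw [epOuterA, PySem.List.pyRange_one_eq_nil h24]
    rw [dif_neg (show ¬ strt < 24 by omega)]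
    simp [epLoopB]
  · rw [outer_eq ((24 - strt).toNat) arr res strt le_rfl hl hlo]
    have : win arr strt = (PySem.List.pyRange strt 24 1).map (fun j => PySem.List.pyGetD arr j 0) := rfl
    rw [← this, epLoopB_shift (win arr strt).length (win arr strt) rfl strt res]
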